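-- pv_equiv track=rewrite | github.com/jungle-5th/algorithm-study | 구자건/정답/23304_아라라카.py | akaraka
-- ===== SOURCE A (Python) =====
-- def akaraka(input_line):
--     if len(input_line) == 0:
--         return 'AKARAKA'
--
--     line_length = len(input_line)
--     k = line_length//2
--     for i in range(k):
--         if input_line[i] != input_line[-1-i]: return 'IPSELENTI'
--     next_input_line = input_line[0 : k]
--     return akaraka(next_input_line)
-- ===== SOURCE B (Python) =====
-- def akaraka(input_line):
--     length = len(input_line)
--     while length != 0:
--         k = length // 2
--         for i in range(k):
--             if input_line[i] != input_line[length - 1 - i]: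
--                 return 'IPSELENTI'
--         length = k
--     return 'AKARAKA'
-- ===== Notes on version B (the rewrite author's own statement) =====
-- stated objective: alternative
-- what changed: Replaced the recursion that re-slices the string at each level by a while-loop that keeps one integer prefix length and indexes into the original string, so no slice copies are made.
import Mathlib
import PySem

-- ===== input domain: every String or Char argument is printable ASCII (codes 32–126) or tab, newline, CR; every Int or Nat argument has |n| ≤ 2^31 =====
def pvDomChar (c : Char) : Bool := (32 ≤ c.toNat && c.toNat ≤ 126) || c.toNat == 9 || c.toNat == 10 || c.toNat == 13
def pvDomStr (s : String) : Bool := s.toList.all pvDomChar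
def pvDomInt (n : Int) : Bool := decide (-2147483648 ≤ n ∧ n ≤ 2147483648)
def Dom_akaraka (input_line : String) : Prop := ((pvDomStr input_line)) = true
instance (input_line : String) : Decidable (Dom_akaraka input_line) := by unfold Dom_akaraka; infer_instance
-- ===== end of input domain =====

-- Header: B replaces A's slice-and-recurse with a while-loop over a prefix length
-- indexing the original string (alternative decomposition; no slice copies).


-- ===== PORT A =====
-- recursion over the char list; the for-loop with early return is the short-circuiting
-- `List.any` over `range k`; indexing uses PySem.List.pyGet? (input_line[-1-i] exactly)
def akarakaGo : List Char → String := fun l =>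
  if l.length = 0 then "AKARAKA"
  else
    let k := l.length / 2
    if (List.range k).any
        (fun i => PySem.List.pyGet? l (i : Int) ≠ PySem.List.pyGet? l (-1 - (i : Int))) then
      "IPSELENTI"
    else
      akarakaGo (PySem.List.slice l (some 0) (some (k : Int)))
termination_by l => l.length
decreasing_by
  simp only [PySem.List.slice_zero_start, PySem.List.slice_to_natCast, List.length_take]
  omega

def akaraka (input_line : String) : String := akarakaGo input_line.toList

-- ===== PORT B =====
-- while-loop over the maintained prefix length; positive in-range indexing is ported
-- with List.get? (exact: all accessed indices are < length of the list on every call made)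
def akarakaAltGo (l : List Char) : Nat → String := fun len =>
  if len = 0 then "AKARAKA"
  else
    let k := len / 2
    if (List.range k).any (fun i => l[i]? ≠ l[len - 1 - i]?) then
      "IPSELENTI"
    else
      akarakaAltGo l k
termination_by len => len
decreasing_by omega

def akaraka_alt (input_line : String) : String :=
  akarakaAltGo input_line.toList input_line.toList.length

-- ===== PRECONDITION & SPEC =====
def Spec_akaraka (input_line : String) (out : String) : Prop := out = akaraka_alt input_line
instance (input_line : String) (out : String) : Decidable (Spec_akaraka input_line out) := by unfold Spec_akaraka; infer_instance

-- ===== CLAIM =====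
def Claim_equal_akaraka : Prop := ∀ (input_line : String), Dom_akaraka input_line → Spec_akaraka input_line (akaraka input_line)

-- ===== LEMMAS AND PROOFS =====

-- B's loop only looks at the first `len` characters
theorem altGo_take_congr (len : Nat) :
    ∀ (l₁ l₂ : List Char), l₁.take len = l₂.take len →
      akarakaAltGo l₁ len = akarakaAltGo l₂ len := by
  induction len using Nat.strong_induction_on with
  | _ len ih =>
    intro l₁ l₂ h
    rw [akarakaAltGo, akarakaAltGo]
    by_cases h0 : len = 0
    · simp [h0]
    · simp only [h0, if_false]
      have hget : ∀ j, j < len → l₁[j]? = l₂[j]? := by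
        intro j hj
        have := congrArg (fun t => t[j]?) h
        simpa [List.getElem?_take, hj] using this
      have hcond : ((List.range (len / 2)).any fun i => decide (l₁[i]? ≠ l₁[len - 1 - i]?))
          = ((List.range (len / 2)).any fun i => decide (l₂[i]? ≠ l₂[len - 1 - i]?)) := by
        rw [Bool.eq_iff_iff]
        simp only [List.any_eq_true, List.mem_range, decide_eq_true_eq]
        constructor
        · rintro ⟨i, hik, hne⟩
          exact ⟨i, hik, by rwa [hget i (by omega), hget (len - 1 - i) (by omega)] at hne⟩
        · rintro ⟨i, hik, hne⟩
          exact ⟨i, hik, by rwa [hget i (by omega), hget (len - 1 - i) (by omega)]⟩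
      rw [hcond]
      split_ifs with hc
      · rfl
      · exact ih (len / 2) (by omega) l₁ l₂ (by
          have h2 : (l₁.take len).take (len / 2) = (l₂.take len).take (len / 2) := by rw [h]
          simpa [List.take_take, Nat.min_eq_left (by omega : len / 2 ≤ len)] using h2)

theorem go_eq_altGo (n : Nat) : ∀ (l : List Char), l.length = n →
    akarakaGo l = akarakaAltGo l l.length := by
  induction n using Nat.strong_induction_on with
  | _ n ih =>
    intro l hn
    rw [akarakaGo, akarakaAltGo]
    by_cases h0 : l.length = 0
    · simp [h0]
    · simp only [h0, if_false]
      have hcond : ((List.range (l.length / 2)).any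
            fun i => decide (PySem.List.pyGet? l (i : Int) ≠ PySem.List.pyGet? l (-1 - (i : Int))))
          = ((List.range (l.length / 2)).any
            fun i => decide (l[i]? ≠ l[l.length - 1 - i]?)) := by
        rw [Bool.eq_iff_iff]
        simp only [List.any_eq_true, List.mem_range, decide_eq_true_eq]
        have key : ∀ i, i < l.length / 2 →
            ((PySem.List.pyGet? l (i : Int) = PySem.List.pyGet? l (-1 - (i : Int)))
              ↔ (l[i]? = l[l.length - 1 - i]?)) := by
          intro i hik
          have h1 : PySem.List.pyGet? l (i : Int) = l[i]? := PySem.List.pyGet?_natCast l i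
          have hneg : (-1 - (i : Int)) = -(((i + 1 : Nat) : Int)) := by push_cast; ring
          have h2 : PySem.List.pyGet? l (-1 - (i : Int)) = l[l.length - 1 - i]? := by
            rw [hneg, PySem.List.pyGet?_neg_natCast _ _ (by omega) (by omega)]
            have he : l.length - (i + 1) = l.length - 1 - i := by omega
            rw [he]
          rw [h1, h2]
        constructor
        · rintro ⟨i, hik, hne⟩; exact ⟨i, hik, fun he => hne ((key i hik).mpr he)⟩
        · rintro ⟨i, hik, hne⟩; exact ⟨i, hik, fun he => hne ((key i hik).mp he)⟩
      rw [hcond]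
      split_ifs with hc
      · rfl
      · have hslice : PySem.List.slice l (some (0 : Int)) (some ((l.length / 2 : Nat) : Int))
            = l.take (l.length / 2) := by
          rw [PySem.List.slice_zero_start, PySem.List.slice_to_natCast]
        rw [hslice]
        have hlen : (l.take (l.length / 2)).length = l.length / 2 := by
          simp [Nat.min_eq_left (by omega : l.length / 2 ≤ l.length)]
        rw [ih (l.length / 2) (by omega) _ hlen, hlen]
        exact altGo_take_congr (l.length / 2) _ _ (by
          simp [List.take_take])

-- ===== VERDICT =====
theorem akaraka_spec : Claim_equal_akaraka := by
  intro s _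
  unfold Spec_akaraka akaraka akaraka_alt
  exact go_eq_altGo s.toList.length s.toList rfl
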